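-- pv_equiv track=rewrite | github.com/sinoyuco/leetcode_solutions | word_crunch.py | word_crunch
-- ===== SOURCE A (Python) =====
-- def word_crunch(str):
--
--     if len(str) < 3:
--         return str
--
--     i = 0
--     while i < len(str)-2:
--         if str[i] == str[i+1] == str[i+2]:
--             j = i
--             while (j+1)<len(str) and str[j] == str[j+1]:
--                 j+=1
--             str = str[:i]+str[(j+1):]
--
--             if i-2 >= 0 and str[i-2]==str[i-1]:
--                 i = max(0, i-2)
--             else:
--                 i = max(0, i-1)
--         else:
--             i+=1
--     return str
-- ===== SOURCE B (Python) =====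
-- def word_crunch(str):
--     stack = []  # run-length stack of (char, count)
--     for c in str:
--         if stack and stack[-1][0] != c and stack[-1][1] >= 3:
--             stack.pop()
--         if stack and stack[-1][0] == c:
--             stack[-1] = (c, stack[-1][1] + 1)
--         else:
--             stack.append((c, 1))
--     if stack and stack[-1][1] >= 3:
--         stack.pop()
--     return "".join(ch * n for ch, n in stack)
-- ===== Notes on version B (the rewrite author's own statement) =====
-- stated objective: alternative
-- what changed: Replaced A's index-rescanning while-loop that repeatedly splices the string and backtracks i after each deletion by a single left-to-right pass maintaining a run-length stack of (char, count) pairs, popping a run once a following different character (or the end of input) confirms its length is >= 3.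
import Mathlib
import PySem

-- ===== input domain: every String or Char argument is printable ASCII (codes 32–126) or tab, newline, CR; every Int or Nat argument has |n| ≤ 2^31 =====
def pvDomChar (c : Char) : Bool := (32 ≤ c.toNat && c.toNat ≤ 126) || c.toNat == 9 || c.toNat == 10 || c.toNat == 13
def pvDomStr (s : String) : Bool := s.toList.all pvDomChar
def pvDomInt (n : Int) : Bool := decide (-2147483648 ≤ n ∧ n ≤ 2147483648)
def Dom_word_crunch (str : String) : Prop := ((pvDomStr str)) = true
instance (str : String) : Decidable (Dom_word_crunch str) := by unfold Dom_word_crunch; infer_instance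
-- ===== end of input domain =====

-- B replaces A's rescanning while-loop with repeated string splicing by a single
-- left-to-right pass over a run-length stack (alternative algorithm; one pass, no splicing).

-- ===== PORT A =====
-- inner while loop of A: extend j to the end of the equal run
-- (indices stay ≥ 0 in the Python, so Nat indices and List.getD are exact: every
--  access is guarded to be in range, where Python indexing returns the same char)
lemma frE_dec (len j : Nat) (h : j + 1 < len) : len - (j + 1) < len - j :=
  Nat.sub_succ_lt_self len j (Nat.lt_of_succ_lt h)

def findRunEnd (s : List Char) (j : Nat) : Nat :=
  if h : j + 1 < s.length ∧ s.getD j ' ' = s.getD (j+1) ' ' then findRunEnd s (j+1) else j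
termination_by s.length - j
decreasing_by exact frE_dec s.length j h.1

lemma findRunEnd_ge (s : List Char) (j : Nat) : j ≤ findRunEnd s j := by
  unfold findRunEnd; split
  · exact Nat.le_trans (Nat.le_succ j) (findRunEnd_ge s (j+1))
  · exact Nat.le_refl j
termination_by s.length - j
decreasing_by exact frE_dec s.length j (by rename_i h; exact h.1)

lemma crunch_dec3 (len i : Nat) (h : i < len - 2) : 3 * len - (i + 1) < 3 * len - i :=
  Nat.sub_succ_lt_self _ i (Nat.lt_of_lt_of_le (Nat.lt_of_lt_of_le h (Nat.sub_le len 2))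
    (Nat.le_mul_of_pos_left len (Nat.succ_pos 2)))

lemma nat_le_sub2 (i : Nat) : i ≤ i - 2 + 2 := le_tsub_add

lemma nat_le_sub1 (i : Nat) : i ≤ i - 1 + 2 :=
  Nat.le_trans le_tsub_add (Nat.add_le_add_left (Nat.le_succ 1) (i - 1))

lemma crunch_dec_arith (L len i i' : Nat) (hL : L + 1 ≤ len) (h : i < len - 2)
    (hi : i ≤ i' + 2) : 3 * L - i' < 3 * len - i := by
  have hil : i < len := Nat.lt_of_lt_of_le h (Nat.sub_le len 2)
  have h3 : 3 * L + 3 ≤ 3 * len := by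
    have h' := Nat.mul_le_mul_left 3 hL
    rwa [Nat.mul_add, Nat.mul_one] at h'
  apply Nat.lt_sub_of_add_lt
  rcases Nat.le_total i' (3 * L) with hc | hc
  · calc 3 * L - i' + i ≤ 3 * L - i' + (i' + 2) := Nat.add_le_add_left hi _
      _ = 3 * L - i' + i' + 2 := (Nat.add_assoc _ _ _).symm
      _ = 3 * L + 2 := by rw [Nat.sub_add_cancel hc]
      _ < 3 * len := Nat.lt_of_lt_of_le (Nat.lt_succ_self _) h3
  · rw [Nat.sub_eq_zero_of_le hc, Nat.zero_add]
    exact Nat.lt_of_lt_of_le hil (Nat.le_mul_of_pos_left len (Nat.succ_pos 2))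

lemma crunch_dec_len (a b len i j : Nat) (ha : a ≤ i) (hb : b = len - (j + 1))
    (hj : i ≤ j) (h : i < len - 2) : a + b + 1 ≤ len := by
  subst hb
  have hil : i < len := Nat.lt_of_lt_of_le h (Nat.sub_le len 2)
  have ha1 : a + 1 ≤ len := Nat.le_trans (Nat.succ_le_succ ha) hil
  have hsub : len - (j + 1) ≤ len - (a + 1) :=
    Nat.sub_le_sub_left (Nat.succ_le_succ (Nat.le_trans ha hj)) len
  calc a + (len - (j + 1)) + 1 ≤ a + (len - (a + 1)) + 1 :=
        Nat.add_le_add_right (Nat.add_le_add_left hsub a) 1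
    _ = (a + 1) + (len - (a + 1)) := by rw [Nat.add_right_comm]
    _ = len := Nat.add_sub_cancel' ha1

lemma crunch_dec (s : List Char) (i : Nat) (h : i < s.length - 2) (i' : Nat) (hi : i ≤ i' + 2) :
    3 * (s.take i ++ s.drop (findRunEnd s i + 1)).length - i' < 3 * s.length - i := by
  apply crunch_dec_arith _ _ _ _ _ h hi
  rw [List.length_append]
  exact crunch_dec_len _ _ _ i (findRunEnd s i) (List.length_take_le i s)
    (List.length_drop) (findRunEnd_ge s i) h

-- outer while loop of A, state (current string, i)
def crunchLoop (s : List Char) (i : Nat) : List Char :=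
  if hlt : i < s.length - 2 then
    if heq : s.getD i ' ' = s.getD (i+1) ' ' ∧ s.getD (i+1) ' ' = s.getD (i+2) ' ' then
      let j := findRunEnd s i
      let s' := s.take i ++ s.drop (j+1)
      -- Python: `if i-2 >= 0 and str[i-2]==str[i-1]`; `i-2 >= 0` is `2 ≤ i` on Nat,
      -- and then max(0, i-2)/max(0, i-1) are Nat subtraction
      if 2 ≤ i ∧ s'.getD (i-2) ' ' = s'.getD (i-1) ' ' then
        crunchLoop s' (i-2)
      else
        crunchLoop s' (i-1)
    else
      crunchLoop s (i+1)
  else s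
termination_by 3 * s.length - i
decreasing_by
  · exact crunch_dec s i hlt (i - 2) (nat_le_sub2 i)
  · exact crunch_dec s i hlt (i - 1) (nat_le_sub1 i)
  · exact crunch_dec3 s.length i hlt

def word_crunch (str : String) : String :=
  if str.toList.length < 3 then str
  else String.ofList (crunchLoop str.toList 0)

-- ===== PORT B =====
-- one character step of B's run-length stack (head of the list = top of the stack)
def stepB (st : List (Char × Nat)) (c : Char) : List (Char × Nat) :=
  let st1 : List (Char × Nat) :=
    match st with
    | (d, k) :: rest => if d ≠ c ∧ 3 ≤ k then rest else (d, k) :: rest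
    | [] => []
  match st1 with
  | (d, k) :: rest => if d = c then (c, k + 1) :: rest else (c, 1) :: (d, k) :: rest
  | [] => [(c, 1)]

-- B's final `if stack and stack[-1][1] >= 3: stack.pop()`
def popTop3 (st : List (Char × Nat)) : List (Char × Nat) :=
  match st with
  | (d, k) :: rest => if 3 ≤ k then rest else (d, k) :: rest
  | [] => []

-- B's final join of ch * n over the stack (bottom-to-top = reversed list)
def renderStack (st : List (Char × Nat)) : List Char :=
  st.reverse.foldl (fun acc e => acc ++ List.replicate e.2 e.1) []

def word_crunch_alt (str : String) : String :=
  String.ofList (renderStack (popTop3 (str.toList.foldl stepB [])))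

-- ===== PRECONDITION & SPEC =====
def Spec_word_crunch (str : String) (out : String) : Prop := out = word_crunch_alt str
instance (str : String) (out : String) : Decidable (Spec_word_crunch str out) := by unfold Spec_word_crunch; infer_instance

-- ===== CLAIM (what is proved, stated in full; the proofs are below) =====
def Claim_equal_word_crunch : Prop := ∀ (str : String), Dom_word_crunch str → Spec_word_crunch str (word_crunch str)

-- ===== LEMMAS AND PROOFS =====

-- a triple of equal characters starts at index j
def Trip (s : List Char) (j : Nat) : Prop :=
  j + 2 < s.length ∧ s.getD j ' ' = s.getD (j+1) ' ' ∧ s.getD (j+1) ' ' = s.getD (j+2) ' '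

-- triple-free
def TF (s : List Char) : Prop := ∀ j, ¬ Trip s j

def BcoreL (l : List Char) : List (Char × Nat) := l.foldl stepB []

def BfullL (l : List Char) : List Char := renderStack (popTop3 (BcoreL l))

-- every stack entry has count in [1,2]
def GoodS (st : List (Char × Nat)) : Prop := ∀ e ∈ st, 1 ≤ e.2 ∧ e.2 ≤ 2

lemma renderStack_cons (e : Char × Nat) (st : List (Char × Nat)) :
    renderStack (e :: st) = renderStack st ++ List.replicate e.2 e.1 := by
  simp [renderStack, List.foldl_append]

lemma word_crunch_alt_eq (s : String) : word_crunch_alt s = String.ofList (BfullL s.toList) := rfl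

lemma trip_append3 (q : List Char) (d : Char) : Trip (q ++ [d, d, d]) q.length := by
  refine ⟨by simp, ?_, ?_⟩ <;>
    rw [List.getD_append_right q _ ' ' _ (by omega), List.getD_append_right q _ ' ' _ (by omega)] <;>
    simp [List.getD,
      show q.length + 1 - q.length = 1 by omega, show q.length + 2 - q.length = 2 by omega]

lemma tf_append_left {l : List Char} {c : Char} (h : TF (l ++ [c])) : TF l := by
  intro j hj
  apply h j
  obtain ⟨hlen, h1, h2⟩ := hj
  refine ⟨by simp; omega, ?_, ?_⟩ <;>
    rw [List.getD_append _ _ _ _ (by omega), List.getD_append _ _ _ _ (by omega)] <;> assumption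

lemma bcore_tf : ∀ (p : List Char), TF p → renderStack (BcoreL p) = p ∧ GoodS (BcoreL p) := by
  intro p
  induction p using List.reverseRecOn with
  | nil =>
    intro _
    exact ⟨rfl, by intro e he; simp [BcoreL] at he⟩
  | append_singleton l c ih =>
    intro htf
    obtain ⟨hr, hg⟩ := ih (tf_append_left htf)
    have hstep : BcoreL (l ++ [c]) = stepB (BcoreL l) c := by
      simp [BcoreL, List.foldl_append]
    cases hS : BcoreL l with
    | nil =>
      have hl : l = [] := by rw [hS] at hr; simpa [renderStack] using hr.symm
      subst hl
      rw [hS] at hstep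
      refine ⟨?_, ?_⟩
      · rw [hstep]; simp [stepB, renderStack]
      · rw [hstep]; intro e he
        simp [stepB] at he
        subst he; exact ⟨by omega, by omega⟩
    | cons e rest =>
      obtain ⟨d, k⟩ := e
      rw [hS] at hstep hr
      have hk := hg (d, k) (by rw [hS]; simp)
      have hgrest : GoodS rest := by intro e he; exact hg e (by rw [hS]; simp [he])
      have h3 : ¬ 3 ≤ k := by omega
      by_cases hdc : d = c
      · have hst1 : stepB ((d, k) :: rest) c = (c, k + 1) :: rest := by
          simp [stepB, h3, hdc]
        have hk1 : k = 1 := by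
          by_contra hne
          have hk2 : k = 2 := by omega
          subst hk2
          have hl : l = renderStack rest ++ [d, d] := by
            rw [renderStack_cons] at hr
            simpa [List.replicate] using hr.symm
          refine htf (renderStack rest).length ?_
          have hlc : l ++ [c] = renderStack rest ++ [d, d, d] := by
            rw [hl, List.append_assoc, hdc]; rfl
          rw [hlc, hdc]
          exact trip_append3 _ c
        subst hk1
        refine ⟨?_, ?_⟩
        · rw [hstep, hst1, renderStack_cons]
          rw [renderStack_cons] at hr
          rw [← hr, hdc]
          simp [List.replicate_succ']
        · rw [hstep, hst1]
          intro e he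
          rcases List.mem_cons.mp he with rfl | hmem
          · exact ⟨by omega, by omega⟩
          · exact hgrest e hmem
      · have hst1 : stepB ((d, k) :: rest) c = (c, 1) :: (d, k) :: rest := by
          simp [stepB, h3, hdc]
        refine ⟨?_, ?_⟩
        · rw [hstep, hst1, renderStack_cons, hr]
          simp [List.replicate]
        · rw [hstep, hst1]
          intro e he
          rcases List.mem_cons.mp he with rfl | hmem
          · exact ⟨by omega, by omega⟩
          · rw [← hS] at hmem; exact hg e hmem

lemma last_of_render {st : List (Char × Nat)} {d : Char} {k : Nat} {rest : List (Char × Nat)}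
    (hst : st = (d, k) :: rest) (hk : 1 ≤ k) {p : List Char} (hp : renderStack st = p) :
    p.getLast? = some d := by
  subst hst
  rw [renderStack_cons] at hp
  subst hp
  rw [List.getLast?_append]
  obtain ⟨k', rfl⟩ : ∃ k', k = k' + 1 := ⟨k - 1, by omega⟩
  simp [List.replicate_succ']

lemma stepB_push (c : Char) (S : List (Char × Nat))
    (htop : ∀ d kk rest, S = (d, kk) :: rest → d ≠ c ∧ kk ≤ 2) :
    stepB S c = (c, 1) :: S := by
  cases S with
  | nil => rfl
  | cons e rest =>
    obtain ⟨d, kk⟩ := e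
    obtain ⟨hne, hle⟩ := htop d kk rest rfl
    have h3 : ¬ 3 ≤ kk := by omega
    simp [stepB, h3, hne]

lemma foldl_merge (k : Nat) (c : Char) : ∀ (m : Nat) (S : List (Char × Nat)),
    List.foldl stepB ((c, m) :: S) (List.replicate k c) = (c, m + k) :: S := by
  induction k with
  | zero => intro m S; simp
  | succ k ih =>
    intro m S
    have hstep : stepB ((c, m) :: S) c = (c, m + 1) :: S := by simp [stepB]
    rw [List.replicate_succ, List.foldl_cons, hstep, ih]
    ring_nf

lemma foldl_rep (k : Nat) (c : Char) (S : List (Char × Nat)) (hk : 1 ≤ k)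
    (htop : ∀ d kk rest, S = (d, kk) :: rest → d ≠ c ∧ kk ≤ 2) :
    List.foldl stepB S (List.replicate k c) = (c, k) :: S := by
  obtain ⟨k', rfl⟩ : ∃ k', k = k' + 1 := ⟨k - 1, by omega⟩
  rw [List.replicate_succ, List.foldl_cons, stepB_push c S htop, foldl_merge]
  ring_nf

lemma step_skip (c c' : Char) (k : Nat) (S : List (Char × Nat)) (h1 : c' ≠ c) (h2 : 3 ≤ k)
    (htop : ∀ d kk rest, S = (d, kk) :: rest → kk ≤ 2) :
    stepB ((c, k) :: S) c' = stepB S c' := by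
  have hne : c ≠ c' := fun h => h1 h.symm
  cases S with
  | nil => simp [stepB, hne, h2]
  | cons e rest =>
    obtain ⟨d, kk⟩ := e
    have hle := htop d kk rest rfl
    have h3 : ¬ 3 ≤ kk := by omega
    simp [stepB, hne, h2, h3]

lemma popTop3_good (S : List (Char × Nat)) (h : GoodS S) : popTop3 S = S := by
  cases S with
  | nil => rfl
  | cons e rest =>
    obtain ⟨d, k⟩ := e
    have := h (d, k) (by simp)
    simp only [popTop3]
    rw [if_neg (by omega)]

lemma bfull_del (p t : List Char) (c : Char) (k : Nat) (hTF : TF p)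
    (hlast : ∀ d ∈ p.getLast?, d ≠ c) (hk : 3 ≤ k) (hhead : ∀ d ∈ t.head?, d ≠ c) :
    BfullL (p ++ (List.replicate k c ++ t)) = BfullL (p ++ t) := by
  obtain ⟨hr, hg⟩ := bcore_tf p hTF
  have htopS : ∀ d kk rest, BcoreL p = (d, kk) :: rest → d ≠ c ∧ kk ≤ 2 := by
    intro d kk rest hS
    have hkk := hg (d, kk) (by rw [hS]; simp)
    refine ⟨?_, hkk.2⟩
    have hlastp : p.getLast? = some d := last_of_render hS hkk.1 hr
    intro hdc
    exact hlast d (by rw [hlastp]; exact rfl) hdc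
  have hcoreL : BcoreL (p ++ (List.replicate k c ++ t)) =
      List.foldl stepB ((c, k) :: BcoreL p) t := by
    show List.foldl stepB [] (p ++ (List.replicate k c ++ t)) = _
    rw [List.foldl_append, List.foldl_append,
      show List.foldl stepB [] p = BcoreL p from rfl,
      foldl_rep k c (BcoreL p) (by omega) htopS]
  have hcoreR : BcoreL (p ++ t) = List.foldl stepB (BcoreL p) t := by
    show List.foldl stepB [] (p ++ t) = _
    rw [List.foldl_append,
      show List.foldl stepB [] p = BcoreL p from rfl]
  cases t with
  | nil =>
    simp only [List.foldl_nil] at hcoreL hcoreR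
    rw [BfullL, BfullL, hcoreL, hcoreR]
    have h1 : popTop3 ((c, k) :: BcoreL p) = BcoreL p := by
      simp [popTop3, hk]
    rw [h1, popTop3_good _ hg]
  | cons c' t' =>
    have hc' : c' ≠ c := hhead c' rfl
    have hskip : stepB ((c, k) :: BcoreL p) c' = stepB (BcoreL p) c' :=
      step_skip c c' k (BcoreL p) hc' hk (fun d kk rest h => (htopS d kk rest h).2)
    rw [BfullL, BfullL, hcoreL, hcoreR, List.foldl_cons, List.foldl_cons, hskip]

lemma tf_id (s : List Char) (h : TF s) : BfullL s = s := by
  obtain ⟨hr, hg⟩ := bcore_tf s h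
  rw [BfullL, popTop3_good _ hg, hr]

lemma getD_take (s : List Char) (i n : Nat) (hn : n < i) (hi : i ≤ s.length) :
    (s.take i).getD n ' ' = s.getD n ' ' := by
  have hlt : n < (s.take i).length := by simp [List.length_take]; omega
  rw [List.getD_eq_getElem _ _ hlt, List.getD_eq_getElem _ _ (by simp at hlt; omega),
    List.getElem_take]

-- getD of s.take i ++ t agrees with s below i
lemma getD_pref (s t : List Char) (i n : Nat) (hn : n < i) (hi : i ≤ s.length) :
    (s.take i ++ t).getD n ' ' = s.getD n ' ' := by
  have hlt : n < (s.take i).length := by simp [List.length_take]; omega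
  rw [List.getD_append _ _ _ _ hlt, getD_take s i n hn hi]

lemma findRunEnd_step {s : List Char} {j : Nat} (h1 : j + 1 < s.length)
    (h2 : s.getD j ' ' = s.getD (j+1) ' ') : findRunEnd s j = findRunEnd s (j+1) := by
  rw [findRunEnd]; rw [dif_pos ⟨h1, h2⟩]

lemma findRunEnd_lt (s : List Char) (j : Nat) (h : j < s.length) : findRunEnd s j < s.length := by
  rw [findRunEnd]; split
  · exact findRunEnd_lt s (j+1) (by omega)
  · exact h
termination_by s.length - j
decreasing_by omega

lemma findRunEnd_stop (s : List Char) (j : Nat) :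
    ¬ (findRunEnd s j + 1 < s.length ∧ s.getD (findRunEnd s j) ' ' = s.getD (findRunEnd s j + 1) ' ') := by
  rw [findRunEnd]; split
  · exact findRunEnd_stop s (j+1)
  · assumption
termination_by s.length - j
decreasing_by omega

lemma findRunEnd_run (s : List Char) (j : Nat) : ∀ m, j ≤ m → m ≤ findRunEnd s j →
    s.getD m ' ' = s.getD j ' ' := by
  intro m hjm hm
  by_cases h : j + 1 < s.length ∧ s.getD j ' ' = s.getD (j+1) ' '
  · rw [findRunEnd_step h.1 h.2] at hm
    rcases Nat.eq_or_lt_of_le hjm with rfl | hlt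
    · rfl
    · rw [findRunEnd_run s (j+1) m (by omega) hm]; exact h.2.symm
  · rw [findRunEnd] at hm; rw [dif_neg h] at hm
    have : m = j := by omega
    subst this; rfl
termination_by s.length - j
decreasing_by omega

lemma decomp (s : List Char) (i : Nat) (h2 : i + 2 < s.length)
    (ha : s.getD i ' ' = s.getD (i+1) ' ') (hb : s.getD (i+1) ' ' = s.getD (i+2) ' ') :
    s = s.take i ++ (List.replicate (findRunEnd s i + 1 - i) (s.getD i ' ') ++ s.drop (findRunEnd s i + 1))
      ∧ i + 2 ≤ findRunEnd s i := by
  have hge : i + 2 ≤ findRunEnd s i := by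
    rw [findRunEnd_step (by omega) ha, findRunEnd_step (by omega) hb]
    exact findRunEnd_ge s (i+2)
  refine ⟨?_, hge⟩
  have hjlt : findRunEnd s i < s.length := findRunEnd_lt s i (by omega)
  set jj := findRunEnd s i with hjj
  have hmid : (s.take (jj+1)).drop i = List.replicate (jj + 1 - i) (s.getD i ' ') := by
    rw [List.eq_replicate_iff]
    constructor
    · simp [List.length_drop, List.length_take]; omega
    · intro b hb
      obtain ⟨m, hm, hbm⟩ := List.mem_iff_getElem.mp hb
      have hmlt : i + m ≤ jj := by
        simp [List.length_drop, List.length_take] at hm; omega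
      rw [List.getElem_drop, List.getElem_take] at hbm
      have hrun := findRunEnd_run s i (i + m) (by omega) (by omega)
      rw [List.getD_eq_getElem _ _ (by omega)] at hrun
      rw [← hbm, hrun]
  calc s = s.take (jj+1) ++ s.drop (jj+1) := (List.take_append_drop _ _).symm
    _ = ((s.take (jj+1)).take i ++ (s.take (jj+1)).drop i) ++ s.drop (jj+1) := by
        conv_lhs => rw [← List.take_append_drop i (s.take (jj+1))]
    _ = s.take i ++ (List.replicate (jj + 1 - i) (s.getD i ' ') ++ s.drop (jj+1)) := by
        rw [List.take_take, min_eq_left (by omega), hmid, List.append_assoc]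

lemma last_take (s : List Char) (i : Nat) (h1 : 1 ≤ i) (h2 : i ≤ s.length) :
    (s.take i).getLast? = some (s.getD (i-1) ' ') := by
  have hlen : (s.take i).length = i := by simp [List.length_take]; omega
  rw [List.getLast?_eq_getElem?, hlen, List.getElem?_eq_getElem (by omega)]
  rw [List.getElem_take, List.getD_eq_getElem _ _ (by omega)]

theorem crunch_main : ∀ (s : List Char) (i : Nat), (∀ j, j < i → ¬ Trip s j) →
    crunchLoop s i = BfullL s := by
  intro s i hinv
  rw [crunchLoop]
  split
  case isFalse h =>
    refine (tf_id s ?_).symm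
    intro j htrip
    have hjlen := htrip.1
    exact hinv j (by omega) htrip
  case isTrue hlt =>
    split
    case isFalse heq =>
      have hinv1 : ∀ j, j < i + 1 → ¬ Trip s j := by
        intro j hj htrip
        rcases Nat.lt_or_ge j i with h | h
        · exact hinv j h htrip
        · have : j = i := by omega
          subst this
          exact heq ⟨htrip.2.1, htrip.2.2⟩
      exact crunch_main s (i+1) hinv1
    case isTrue heq =>
      obtain ⟨ha, hb⟩ := heq
      obtain ⟨hdec, hge⟩ := decomp s i (by omega) ha hb
      have hjlt : findRunEnd s i < s.length := findRunEnd_lt s i (by omega)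
      have hlen : (s.take i ++ s.drop (findRunEnd s i + 1)).length + 3 ≤ s.length := by
        simp [List.length_append, List.length_take, List.length_drop]; omega
      have hTFp : TF (s.take i) := by
        intro j htrip
        obtain ⟨hjl, hj1, hj2⟩ := htrip
        have hjl' : j + 2 < i := by simp [List.length_take] at hjl; omega
        rw [getD_take s i j (by omega) (by omega), getD_take s i (j+1) (by omega) (by omega)] at hj1
        rw [getD_take s i (j+1) (by omega) (by omega), getD_take s i (j+2) (by omega) (by omega)] at hj2
        exact hinv j (by omega) ⟨by omega, hj1, hj2⟩
      have hlast : ∀ d ∈ (s.take i).getLast?, d ≠ s.getD i ' ' := by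
        intro d hd hdc
        rcases Nat.eq_zero_or_pos i with rfl | hi1
        · simp at hd
        · rw [last_take s i (by omega) (by omega)] at hd
          have hd' : d = s.getD (i-1) ' ' :=
            (Option.some_inj.mp (Option.mem_def.mp hd)).symm
          refine hinv (i-1) (by omega) ⟨by omega, ?_, ?_⟩
          · rw [show i - 1 + 1 = i by omega, ← hd']; exact hdc
          · rw [show i - 1 + 1 = i by omega, show i - 1 + 2 = i + 1 by omega]; exact ha
      have hhead : ∀ d ∈ (s.drop (findRunEnd s i + 1)).head?, d ≠ s.getD i ' ' := by
        intro d hd hdc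
        rcases Nat.lt_or_ge (findRunEnd s i + 1) s.length with hlt2 | hge2
        · rw [List.head?_drop, List.getElem?_eq_getElem hlt2] at hd
          have hd' : d = s.getD (findRunEnd s i + 1) ' ' := by
            rw [List.getD_eq_getElem _ _ hlt2]
            exact (Option.some_inj.mp (Option.mem_def.mp hd)).symm
          refine findRunEnd_stop s i ⟨hlt2, ?_⟩
          rw [findRunEnd_run s i (findRunEnd s i) (findRunEnd_ge s i) (by omega), ← hd', hdc]
        · rw [List.drop_eq_nil_of_le (by omega)] at hd
          simp at hd
      have hdel : BfullL (s.take i ++ s.drop (findRunEnd s i + 1)) = BfullL s := by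
        conv_rhs => rw [hdec]
        exact (bfull_del _ _ _ _ hTFp hlast (by omega) hhead).symm
      have hpref : ∀ j, j + 2 < i →
          Trip (s.take i ++ s.drop (findRunEnd s i + 1)) j → Trip s j := by
        intro j hj htrip
        obtain ⟨hjl, hj1, hj2⟩ := htrip
        rw [getD_pref s _ i j (by omega) (by omega), getD_pref s _ i (j+1) (by omega) (by omega)] at hj1
        rw [getD_pref s _ i (j+1) (by omega) (by omega), getD_pref s _ i (j+2) (by omega) (by omega)] at hj2
        exact ⟨by omega, hj1, hj2⟩
      show (if 2 ≤ i ∧ (s.take i ++ s.drop (findRunEnd s i + 1)).getD (i-2) ' '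
              = (s.take i ++ s.drop (findRunEnd s i + 1)).getD (i-1) ' '
            then crunchLoop (s.take i ++ s.drop (findRunEnd s i + 1)) (i-2)
            else crunchLoop (s.take i ++ s.drop (findRunEnd s i + 1)) (i-1)) = BfullL s
      split
      case isTrue hcond =>
        have hinv2 : ∀ j, j < i - 2 → ¬ Trip (s.take i ++ s.drop (findRunEnd s i + 1)) j := by
          intro j hj htrip
          exact hinv j (by omega) (hpref j (by omega) htrip)
        rw [crunch_main _ (i-2) hinv2, hdel]
      case isFalse hcond =>
        have hinv2 : ∀ j, j < i - 1 → ¬ Trip (s.take i ++ s.drop (findRunEnd s i + 1)) j := by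
          intro j hj htrip
          rcases Nat.lt_or_ge (j + 2) i with h | h
          · exact hinv j (by omega) (hpref j h htrip)
          · have hji : j = i - 2 ∧ 2 ≤ i := by omega
            exact hcond ⟨hji.2, by rw [← hji.1, show i - 1 = j + 1 by omega]; exact htrip.2.1⟩
        rw [crunch_main _ (i-1) hinv2, hdel]
termination_by s i => 3 * s.length - i
decreasing_by
  · omega
  · omega
  · omega

-- ===== VERDICT (by name: the statement is the Claim_ definition above) =====
theorem word_crunch_spec : Claim_equal_word_crunch := by
  intro str _
  unfold Spec_word_crunch
  rw [word_crunch_alt_eq, word_crunch]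
  split
  · rename_i hlen
    have htf : TF str.toList := by
      intro j hj; exact absurd hj.1 (by omega)
    rw [tf_id _ htf]; simp
  · rw [crunch_main str.toList 0 (by omega)]
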